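-- pv_equiv track=rewrite | github.com/Meeperbunny/ProjectEuler | scripts/712.py | cnts
-- ===== SOURCE A (Python) =====
-- def cnts(N, p):
--     k = 0
--     c = []
--     while p**k <= N:
--         c.append(N // (p**k))
--         k += 1
--     rt = 0
--     for i in range(0, len(c)):
--         c[len(c) - i - 1] -= rt
--         rt += c[len(c) - i - 1]
--     return c
-- ===== SOURCE B (Python) =====
-- def cnts(N, p):
--     a = []
--     pk = 1
--     while pk <= N:
--         a.append(N // pk)
--         pk *= p
--     return [x - y for x, y in zip(a, a[1:])] + a[-1:]
-- ===== Notes on version B (the rewrite author's own statement) =====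
-- stated objective: simpler
-- what changed: A transforms the quotient list in place with a reverse running-total accumulator; B builds the quotients with an incremental power and returns the adjacent differences (plus the last element) directly.
import Mathlib
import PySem

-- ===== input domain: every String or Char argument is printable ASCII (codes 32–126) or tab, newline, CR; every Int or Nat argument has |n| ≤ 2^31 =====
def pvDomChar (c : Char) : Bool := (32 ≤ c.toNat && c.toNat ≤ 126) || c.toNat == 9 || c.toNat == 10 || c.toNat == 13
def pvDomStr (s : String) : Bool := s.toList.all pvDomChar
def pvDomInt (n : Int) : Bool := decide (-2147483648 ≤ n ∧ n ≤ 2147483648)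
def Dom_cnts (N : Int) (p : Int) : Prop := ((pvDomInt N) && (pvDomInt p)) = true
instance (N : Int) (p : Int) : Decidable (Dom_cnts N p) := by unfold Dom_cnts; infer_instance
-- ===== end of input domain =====

-- B replaces A's in-place reverse running-total transform by building the quotient
-- list with an incremental power and taking adjacent differences directly (objective: simpler).
-- Pre_ excludes inputs (1 <= N with |p| <= 1) on which Python A's while loop never terminates.
-- ===== PORT A =====
-- while p**k <= N: append N // p**k; fuel 128 suffices on Dom with Pre_ (|N| <= 2^31, |p| >= 2)
def cntsBuild (N : Int) (p : Int) : Nat → Nat → List Int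
  | 0, _ => []
  | fuel+1, k =>
    if p ^ k ≤ N then PySem.Int.floordiv N (p ^ k) :: cntsBuild N p fuel (k+1) else []

-- the for-loop: process c from the back, subtracting rt then adding the new entry to rt
def cntsRT : List Int → List Int × Int
  | [] => ([], 0)
  | x :: xs =>
    let r := cntsRT xs
    ((x - r.2) :: r.1, r.2 + (x - r.2))

def cnts (N : Int) (p : Int) : List Int := (cntsRT (cntsBuild N p 128 0)).1

-- ===== PORT B =====
def cntsBuildAlt (N : Int) (p : Int) : Nat → Int → List Int
  | 0, _ => []
  | fuel+1, pk =>
    if pk ≤ N then PySem.Int.floordiv N pk :: cntsBuildAlt N p fuel (pk * p) else []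

def cnts_alt (N : Int) (p : Int) : List Int :=
  let a := cntsBuildAlt N p 128 1
  List.zipWith (· - ·) a a.tail ++ a.getLast?.toList

-- ===== PRECONDITION & SPEC =====
-- Pre_ excludes exactly the inputs where A's while loop diverges (p**k stays ≤ N forever)
def Pre_cnts (N : Int) (p : Int) : Prop := 1 ≤ N → (p ≤ -2 ∨ 2 ≤ p)
instance (N : Int) (p : Int) : Decidable (Pre_cnts N p) := by unfold Pre_cnts; infer_instance
def pvWitness_cnts : Int × Int := (100, 3)
def Spec_cnts (N : Int) (p : Int) (out : List Int) : Prop := out = cnts_alt N p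
instance (N : Int) (p : Int) (out : List Int) : Decidable (Spec_cnts N p out) := by unfold Spec_cnts; infer_instance

-- ===== CLAIM (what is proved, stated in full; the proofs are below) =====
def Claim_equal_cnts : Prop := ∀ (N : Int) (p : Int), Dom_cnts N p → Pre_cnts N p → Spec_cnts N p (cnts N p)

-- ===== LEMMAS AND PROOFS =====
lemma cntsBuild_eq (N p : Int) : ∀ (fuel : Nat) (k : Nat),
    cntsBuild N p fuel k = cntsBuildAlt N p fuel (p ^ k) := by
  intro fuel
  induction fuel with
  | zero => intro k; rfl
  | succ n ih =>
    intro k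
    simp only [cntsBuild, cntsBuildAlt]
    rw [ih (k+1), pow_succ]

lemma cntsRT_fst : ∀ (a : List Int),
    (cntsRT a).1 = List.zipWith (· - ·) a a.tail ++ a.getLast?.toList := by
  intro a
  induction a with
  | nil => rfl
  | cons x xs ih =>
    cases xs with
    | nil => simp [cntsRT]
    | cons y ys =>
      simp only [cntsRT, List.tail_cons, List.zipWith_cons_cons, List.cons_append] at *
      rw [ih]
      have h : (cntsRT ys).2 + (y - (cntsRT ys).2) = y := by ring
      rw [h]
      simp [List.getLast?_cons_cons]

-- ===== VERDICT (by name: the statement is the Claim_ definition above) =====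
theorem cnts_spec : Claim_equal_cnts := by
  intro N p _ _
  unfold Spec_cnts cnts cnts_alt
  rw [cntsBuild_eq N p 128 0, pow_zero, cntsRT_fst]
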